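-- pv_equiv track=rewrite | github.com/morningsky/text_analysis | stop_sta.py | gen_con_repeat
-- ===== SOURCE A (Python) =====
-- def gen_con_repeat(s,N):
--     #只计算重复的连续值
--     repeat_words = []
--     repeat_num = 0
--     two_gram_dict = []
--     for i in range(len(s)):
--         two_gram_dict.append([s[i:i+N]])
--     for index,value in enumerate(two_gram_dict):
--         if index < len(two_gram_dict)-1:
--             if two_gram_dict[index] == two_gram_dict[index + 1]:
--                 if not str.isdigit(str(two_gram_dict[index])): #去除数字
--                     repeat_num += 1
--                     repeat_words.append(two_gram_dict[index])
--     return repeat_num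
-- ===== SOURCE B (Python) =====
-- def gen_con_repeat(s, N):
--     # Run-based counting: scan maximal runs of consecutive equal N-grams and
--     # add (run length - 1) for each run, instead of A's pairwise index compare.
--     grams = [s[i:i+N] for i in range(len(s))]
--     n = len(grams)
--     total = 0
--     i = 0
--     while i < n:
--         j = i + 1
--         while j < n and grams[j] == grams[i]:
--             j += 1
--         total += j - i - 1
--         i = j
--     return total
-- ===== Notes on version B (the rewrite author's own statement) =====
-- stated objective: alternative
-- what changed: B replaces A's enumerate-and-compare-adjacent-indices pass (with its dead always-true digit guard on str([gram])) by a two-pointer run scan over the N-gram list that adds (run length - 1) for each maximal run of equal grams.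
import Mathlib
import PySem

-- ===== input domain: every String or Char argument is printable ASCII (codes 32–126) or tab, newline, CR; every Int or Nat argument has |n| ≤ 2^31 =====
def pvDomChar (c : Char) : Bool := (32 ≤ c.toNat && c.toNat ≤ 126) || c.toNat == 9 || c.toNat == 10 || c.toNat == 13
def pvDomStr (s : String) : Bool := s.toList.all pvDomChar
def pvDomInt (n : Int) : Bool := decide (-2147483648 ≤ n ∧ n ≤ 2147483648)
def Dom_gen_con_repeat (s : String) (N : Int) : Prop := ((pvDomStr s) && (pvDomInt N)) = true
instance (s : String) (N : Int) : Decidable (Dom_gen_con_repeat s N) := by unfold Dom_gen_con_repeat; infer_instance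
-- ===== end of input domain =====

-- B replaces A's pairwise adjacent-index comparison by a run scan (sum of run length - 1
-- over maximal runs of equal N-grams) and drops A's always-true digit guard; alternative, same cost.


-- ===== PORT A =====
-- two_gram_dict is a list of singleton lists [s[i:i+N]], as in the Python.
-- str.isdigit(str(two_gram_dict[index])): str() of a Python list always begins with '[',
-- so isdigit is False and `not …` is True; ported exactly as the constant test `if !false`.
-- List.zipIdx pairs (value, index); Python's enumerate yields (index, value) — p.2 is the index.
def gen_con_repeat (s : String) (N : Int) : Int :=
  let cs := s.toList
  let tg : List (List (List Char)) :=
    (PySem.List.pyRange 0 (cs.length : Int) 1).foldl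
      (fun acc i => acc ++ [[PySem.List.slice cs (some i) (some (i + N))]]) []
  let st :=
    (tg.zipIdx).foldl
      (fun (st : Int × List (List (List Char))) (p : List (List Char) × Nat) =>
        if (p.2 : Int) < (tg.length : Int) - 1 then
          if PySem.List.pyGetD tg (p.2 : Int) [] == PySem.List.pyGetD tg ((p.2 : Int) + 1) [] then
            if !false then
              (st.1 + 1, st.2 ++ [PySem.List.pyGetD tg (p.2 : Int) []])
            else st
          else st
        else st)
      ((0 : Int), ([] : List (List (List Char))))
  st.1

-- ===== PORT B =====
-- inner `while j < n and grams[j] == grams[i]` loop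
def pvScanRun (grams : List (List Char)) (x : List Char) (j : Nat) : Nat :=
  if h : j < grams.length then
    if grams[j] == x then pvScanRun grams x (j + 1) else j
  else j
termination_by grams.length - j

theorem pvScanRun_ge (grams : List (List Char)) (x : List Char) (j : Nat) :
    j ≤ pvScanRun grams x j := by
  fun_induction pvScanRun grams x j with
  | case1 j h hb ih => omega
  | case2 j h hb => omega
  | case3 j h => omega

-- outer `while i < n` loop
def pvRunLoop (grams : List (List Char)) (i : Nat) : Int :=
  if h : i < grams.length then
    let j := pvScanRun grams grams[i] (i + 1)
    ((j : Int) - (i : Int) - 1) + pvRunLoop grams j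
  else 0
termination_by grams.length - i
decreasing_by
  have := pvScanRun_ge grams grams[i] (i + 1)
  omega

def gen_con_repeat_alt (s : String) (N : Int) : Int :=
  let cs := s.toList
  let grams := (PySem.List.pyRange 0 (cs.length : Int) 1).map
      (fun i => PySem.List.slice cs (some i) (some (i + N)))
  pvRunLoop grams 0

-- ===== PRECONDITION & SPEC =====
def Spec_gen_con_repeat (s : String) (N : Int) (out : Int) : Prop := out = gen_con_repeat_alt s N
instance (s : String) (N : Int) (out : Int) : Decidable (Spec_gen_con_repeat s N out) := by unfold Spec_gen_con_repeat; infer_instance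

-- ===== CLAIM (what is proved, stated in full; the proofs are below) =====
def Claim_equal_gen_con_repeat : Prop := ∀ (s : String) (N : Int), Dom_gen_con_repeat s N → Spec_gen_con_repeat s N (gen_con_repeat s N)

-- ===== LEMMAS AND PROOFS =====

-- number of adjacent equal pairs: the common specification of both loops
def countAdj {α : Type} [BEq α] : List α → Int
  | [] => 0
  | [_] => 0
  | x :: y :: t => (if x == y then 1 else 0) + countAdj (y :: t)

-- indicator sum ∑_{t<n} g (k+t), matching A's fold over indices
def pvSum (g : Nat → Int) : Nat → Nat → Int
  | 0, _ => 0
  | n + 1, k => g k + pvSum g n (k + 1)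

theorem pvSum_congr (g g' : Nat → Int) (n k : Nat) (h : ∀ i, g i = g' i) :
    pvSum g n k = pvSum g' n k := by
  induction n generalizing k with
  | zero => rfl
  | succ n ih => simp [pvSum, h, ih]

theorem pvSum_shift (g : Nat → Int) (n k : Nat) :
    pvSum g n (k + 1) = pvSum (fun i => g (i + 1)) n k := by
  induction n generalizing k with
  | zero => rfl
  | succ n ih => simp [pvSum, ih]

-- A's fold: the first component accumulates the indicator of its per-index condition
theorem foldA_fst {α W : Type} (g : Nat → Int) (w : Int × W → α × Nat → W)
    (l : List α) (k : Nat) (acc : Int × W) :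
    ((l.zipIdx k).foldl (fun (st : Int × W) p => ((st.1 + g p.2, w st p) : Int × W)) acc).1
      = acc.1 + pvSum g l.length k := by
  induction l generalizing k acc with
  | nil => simp [pvSum]
  | cons x l ih => simp [List.zipIdx_cons, pvSum, ih]; ring


-- the indicator sum over all indices equals countAdj (getD form)
theorem pvSum_countAdj {α : Type} [BEq α] (l : List α) (d : α) :
    pvSum (fun i => if i + 1 < l.length then
        (if l.getD i d == l.getD (i + 1) d then 1 else 0) else 0) l.length 0 = countAdj l := by
  induction l with
  | nil => rfl
  | cons x t ih =>
      simp only [List.length_cons, pvSum, pvSum_shift]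
      rw [pvSum_congr _ (fun i => if i + 1 < t.length then
            (if t.getD i d == t.getD (i + 1) d then 1 else 0) else 0) _ _
          (by intro i
              simp only [List.getD_cons_succ, Nat.add_lt_add_iff_right])]
      rw [ih]
      cases t with
      | nil => simp [countAdj]
      | cons y t' => simp [countAdj]

-- pvScanRun finds the end of the current run
theorem pvScanRun_spec (grams : List (List Char)) (x : List Char) (j : Nat) :
    pvScanRun grams x j = j + ((grams.drop j).takeWhile (fun y => y == x)).length := by
  fun_induction pvScanRun grams x j with
  | case1 j h hb ih =>
      rw [List.drop_eq_getElem_cons h, List.takeWhile_cons]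
      simp [hb]
      omega
  | case2 j h hb =>
      rw [List.drop_eq_getElem_cons h, List.takeWhile_cons]
      simp [hb]
  | case3 j h =>
      rw [List.drop_eq_nil_of_le (by omega)]
      simp

-- run decomposition of countAdj
theorem countAdj_run (x : List Char) (t : List (List Char)) :
    countAdj (x :: t) = ((t.takeWhile (fun y => y == x)).length : Int)
      + countAdj (t.dropWhile (fun y => y == x)) := by
  induction t generalizing x with
  | nil => simp [countAdj]
  | cons y t ih =>
      by_cases hb : y = x
      · subst hb
        simp only [List.takeWhile_cons, List.dropWhile_cons, BEq.rfl]
        simp only [countAdj, BEq.rfl, if_true]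
        rw [ih y]
        simp only [List.length_cons]
        push_cast; ring
      · have hbeq : (y == x) = false := by simp [hb]
        have hbeq' : (x == y) = false := by simp [Ne.symm hb]
        simp only [List.takeWhile_cons, List.dropWhile_cons, hbeq]
        simp [countAdj, hbeq']

-- dropping past the run = dropWhile
theorem drop_length_takeWhile {α : Type} (p : α → Bool) (l : List α) :
    l.drop (l.takeWhile p).length = l.dropWhile p := by
  induction l with
  | nil => simp
  | cons x t ih =>
      cases hp : p x
      · simp [hp]
      · simp [hp, ih]

theorem pvRunLoop_countAdj (grams : List (List Char)) (i : Nat) :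
    pvRunLoop grams i = countAdj (grams.drop i) := by
  fun_induction pvRunLoop grams i with
  | case1 i h j ih =>
      rw [ih]
      have hj : j = (i + 1) + ((grams.drop (i + 1)).takeWhile (fun y => y == grams[i])).length :=
        pvScanRun_spec grams grams[i] (i + 1)
      have hdropj : grams.drop j = (grams.drop (i + 1)).dropWhile (fun y => y == grams[i]) := by
        rw [hj, ← List.drop_drop, drop_length_takeWhile]
      have hdi : grams.drop i = grams[i] :: grams.drop (i + 1) := List.drop_eq_getElem_cons h
      rw [hdropj, hdi, countAdj_run]
      omega
  | case2 i h =>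
      rw [List.drop_eq_nil_of_le (by omega)]
      rfl

-- countAdj is blind to the singleton wrapper
theorem countAdj_map_singleton (l : List (List Char)) :
    countAdj (l.map (fun g => [g])) = countAdj l := by
  induction l with
  | nil => rfl
  | cons x t ih =>
      cases t with
      | nil => rfl
      | cons y t' =>
          have hxy : (([x] : List (List Char)) == [y]) = (x == y) := by
            cases hb : x == y
            · simp_all
            · simp_all
          simp only [List.map_cons] at ih ⊢
          simp only [countAdj, hxy]
          rw [ih]

-- ===== VERDICT (by name: the statement is the Claim_ definition above) =====
theorem gen_con_repeat_spec : Claim_equal_gen_con_repeat := by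
  intro s N _
  show gen_con_repeat s N = gen_con_repeat_alt s N
  simp only [gen_con_repeat, gen_con_repeat_alt]
  rw [PySem.List.foldl_append_singleton_eq_map
        (fun i => [PySem.List.slice s.toList (some i) (some (i + N))]), List.nil_append]
  set gl := (PySem.List.pyRange 0 (s.toList.length : Int) 1).map
      (fun i => PySem.List.slice s.toList (some i) (some (i + N))) with hgl
  have htg : (PySem.List.pyRange 0 (s.toList.length : Int) 1).map
      (fun i => [PySem.List.slice s.toList (some i) (some (i + N))]) = gl.map (fun g => [g]) := by
    rw [hgl, List.map_map]
    rfl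
  rw [htg]
  set tg := gl.map (fun g => [g]) with htgdef
  -- rewrite the loop body into explicit (fst-increment, snd) form
  have hbody : (fun (st : Int × List (List (List Char))) (p : List (List Char) × Nat) =>
        if (p.2 : Int) < (tg.length : Int) - 1 then
          if PySem.List.pyGetD tg (p.2 : Int) [] == PySem.List.pyGetD tg ((p.2 : Int) + 1) [] then
            if !false then
              (st.1 + 1, st.2 ++ [PySem.List.pyGetD tg (p.2 : Int) []])
            else st
          else st
        else st)
      = (fun (st : Int × List (List (List Char))) (p : List (List Char) × Nat) =>
          ((st.1 + (if (p.2 : Int) < (tg.length : Int) - 1 then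
              (if PySem.List.pyGetD tg (p.2 : Int) [] == PySem.List.pyGetD tg ((p.2 : Int) + 1) [] then 1 else 0)
            else 0),
           (if (p.2 : Int) < (tg.length : Int) - 1 then
              if PySem.List.pyGetD tg (p.2 : Int) [] == PySem.List.pyGetD tg ((p.2 : Int) + 1) [] then
                if !false then st.2 ++ [PySem.List.pyGetD tg (p.2 : Int) []] else st.2
              else st.2
            else st.2)) : Int × List (List (List Char)))) := by
    funext st p
    simp only [Bool.not_false, if_true]
    apply Prod.ext <;> split_ifs <;> simp
  rw [hbody]
  refine Eq.trans (foldA_fst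
      (fun i => if (i : Int) < (tg.length : Int) - 1 then
          (if PySem.List.pyGetD tg (i : Int) [] == PySem.List.pyGetD tg ((i : Int) + 1) [] then 1 else 0)
        else 0)
      (fun st p =>
        if (p.2 : Int) < (tg.length : Int) - 1 then
          if PySem.List.pyGetD tg (p.2 : Int) [] == PySem.List.pyGetD tg ((p.2 : Int) + 1) [] then
            if !false then st.2 ++ [PySem.List.pyGetD tg (p.2 : Int) []] else st.2
          else st.2
        else st.2)
      tg 0 ((0 : Int), ([] : List (List (List Char))))) ?_
  rw [zero_add]
  rw [pvSum_congr _ (fun i => if i + 1 < tg.length then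
        (if tg.getD i [] == tg.getD (i + 1) [] then 1 else 0) else 0) _ _
      (by intro i
          by_cases h1 : i + 1 < tg.length
          · rw [if_pos (show (i : Int) < (tg.length : Int) - 1 by omega)]
            rw [show ((i : Int) + 1) = (((i + 1 : Nat) : Int)) by push_cast; ring]
            rw [PySem.List.pyGetD_natCast, PySem.List.pyGetD_natCast]
            simp [h1]
          · rw [if_neg (show ¬ (i : Int) < (tg.length : Int) - 1 by omega)]
            simp [h1])]
  rw [pvSum_countAdj tg ([] : List (List Char))]
  rw [htgdef, countAdj_map_singleton]
  rw [pvRunLoop_countAdj, List.drop_zero]
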